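-- pv_equiv track=rewrite | github.com/USDOT-SDC-Archive/sdc-dot-cvp-ingest | data_processor.py | create_upload_chunks
-- ===== SOURCE A (Python) =====
-- CHUNK_SIZE = 1073741824 # 1 GB
--
-- def create_upload_chunks(file_size, chunk_size = CHUNK_SIZE):
--     full_chunks = int(file_size / chunk_size)
--     remainder_chunk = file_size % chunk_size
--     chunks = []
--     for i in range(0, full_chunks):
--         chunks.append(f'bytes={i * chunk_size}-{(i + 1) * chunk_size - 1}')
--     if remainder_chunk > 0:
--         chunks.append(f'bytes={full_chunks * chunk_size}-{file_size - 1}')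
--     return chunks
-- ===== SOURCE B (Python) =====
-- CHUNK_SIZE = 1073741824 # 1 GB
--
-- def create_upload_chunks(file_size, chunk_size = CHUNK_SIZE):
--     # Build the chunk list BACK-TO-FRONT: repeatedly peel off the last chunk,
--     # whose start is the largest chunk-aligned offset below the current end,
--     # then reverse.  No chunk counting, no remainder special case.
--     if chunk_size <= 0:
--         return []  # no usable chunk step; the peeling loop needs a positive step
--     chunks = []
--     end = file_size
--     while end > 0:
--         start = (end - 1) // chunk_size * chunk_size
--         chunks.append(f'bytes={start}-{end - 1}')
--         end = start
--     chunks.reverse()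
--     return chunks
-- ===== Notes on version B (the rewrite author's own statement) =====
-- stated objective: alternative
-- what changed: Instead of counting full chunks with int(file_size/chunk_size) and appending a remainder chunk in a separate if-branch, B builds the list back-to-front: a loop repeatedly peels off the LAST chunk (start = (end-1)//chunk_size*chunk_size, the largest chunk-aligned offset below the current end), then reverses; chunk counting, the modulo and the remainder branch all disappear (a guard returns [] for chunk_size <= 0, where the peeling loop has no usable step).
-- intended difference: On file_size < 0 with a positive chunk_size that does not divide it, A's remainder branch returns a single nonsense chunk like ['bytes=-9--11'] while B returns [], the intended empty chunk list for a file with no bytes to upload. — e.g. on create_upload_chunks(-10, 3): A returns ["bytes=-9--11"], B returns []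
-- outside the precondition, e.g. on create_upload_chunks(5, 0): A raises ZeroDivisionError, B returns []; on create_upload_chunks(-10, -3): A returns ['bytes=0--4', 'bytes=-3--7', 'bytes=-6--10'], B returns []
import Mathlib
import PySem

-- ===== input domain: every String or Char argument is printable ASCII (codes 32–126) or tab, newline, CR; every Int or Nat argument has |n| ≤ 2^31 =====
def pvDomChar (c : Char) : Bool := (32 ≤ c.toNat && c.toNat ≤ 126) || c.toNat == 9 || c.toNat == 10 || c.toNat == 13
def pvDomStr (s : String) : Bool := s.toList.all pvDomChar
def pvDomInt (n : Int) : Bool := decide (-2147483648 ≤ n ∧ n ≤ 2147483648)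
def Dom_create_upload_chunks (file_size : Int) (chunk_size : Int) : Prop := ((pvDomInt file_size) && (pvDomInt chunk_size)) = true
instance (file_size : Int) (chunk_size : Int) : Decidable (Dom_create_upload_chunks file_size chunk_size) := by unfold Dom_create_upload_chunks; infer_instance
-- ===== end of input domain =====

-- B builds the chunk list back-to-front (peel the last chunk, then reverse) instead of
-- A's full-chunks counting loop plus remainder branch; objective: alternative (same cost).
-- B's guard returns [] for chunk_size <= 0, where its peeling loop has no usable step.


-- ===== PORT A =====
-- int(file_size / chunk_size) is float division truncated toward zero; on the domain
-- (|n| ≤ 2^31) the float quotient truncates exactly, so it is ported as Int.tdiv.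
def create_upload_chunks (file_size : Int) (chunk_size : Int) : List String :=
  let full_chunks := Int.tdiv file_size chunk_size
  let remainder_chunk := PySem.Int.mod file_size chunk_size
  let chunks : List String :=
    (PySem.List.pyRange 0 full_chunks 1).foldl
      (fun acc i =>
        acc ++ ["bytes=" ++ PySem.Int.toStr (i * chunk_size) ++ "-" ++
                PySem.Int.toStr ((i + 1) * chunk_size - 1)]) []
  if remainder_chunk > 0 then
    chunks ++ ["bytes=" ++ PySem.Int.toStr (full_chunks * chunk_size) ++ "-" ++
               PySem.Int.toStr (file_size - 1)]
  else chunks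

-- ===== PORT B =====
-- the while loop: peel the last chunk off [0, e) and recurse on the bytes before it;
-- fuel = file_size.toNat + 1 bounds the iteration count (the end strictly decreases when
-- 0 < chunk_size) and only makes the recursion structural, it never cuts it short.
def pvAltGo (cs : Int) (e : Int) (acc : List String) : Nat → List String
  | 0 => acc
  | fuel + 1 =>
    if e ≤ 0 then acc
    else
      let start := PySem.Int.floordiv (e - 1) cs * cs
      pvAltGo cs start
        (acc ++ ["bytes=" ++ PySem.Int.toStr start ++ "-" ++ PySem.Int.toStr (e - 1)]) fuel

def create_upload_chunks_alt (file_size : Int) (chunk_size : Int) : List String :=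
  if chunk_size ≤ 0 then []  -- no usable chunk step for the peeling loop
  else (pvAltGo chunk_size file_size [] (file_size.toNat + 1)).reverse

-- ===== PRECONDITION & SPEC =====
-- Pre_ excludes chunk_size = 0, where A raises ZeroDivisionError (B returns []), and the
-- corner file_size ≤ chunk_size < 0, where A returns an accidental list of negative
-- byte-range chunks and B's guard returns []: both values are meaningless for that
-- double-nonsense input and no caller would specify either.
def Pre_create_upload_chunks (file_size : Int) (chunk_size : Int) : Prop :=
  chunk_size ≠ 0 ∧ (0 ≤ file_size ∨ 0 < chunk_size ∨ chunk_size < file_size)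
instance (file_size : Int) (chunk_size : Int) : Decidable (Pre_create_upload_chunks file_size chunk_size) := by unfold Pre_create_upload_chunks; infer_instance

def pvWitness_create_upload_chunks : Int × Int := (10, 3)

-- On file_size < 0 with 0 < chunk_size not dividing it, A's remainder branch returns a
-- single nonsense chunk ['bytes=<negative>-<file_size-1>'] while B returns [], the
-- intended empty chunk list for a file with no bytes to upload.
def D_create_upload_chunks (file_size : Int) (chunk_size : Int) : Prop :=
  file_size < 0 ∧ 0 < chunk_size ∧ ¬ (chunk_size ∣ file_size)
instance (file_size : Int) (chunk_size : Int) : Decidable (D_create_upload_chunks file_size chunk_size) := by unfold D_create_upload_chunks; infer_instance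

def Spec_create_upload_chunks (file_size : Int) (chunk_size : Int) (out : List String) : Prop := ¬ D_create_upload_chunks file_size chunk_size → out = create_upload_chunks_alt file_size chunk_size
instance (file_size : Int) (chunk_size : Int) (out : List String) : Decidable (Spec_create_upload_chunks file_size chunk_size out) := by unfold Spec_create_upload_chunks; infer_instance

def pvDiffWitness_create_upload_chunks : Int × Int := (-10, 3)
def pvDiffWitnessOut_create_upload_chunks : (List String) × (List String) := (["bytes=-9--11"], [])

-- ===== CLAIM (what is proved, stated in full; the proofs are below) =====
def Claim_unchanged_create_upload_chunks : Prop := ∀ (file_size : Int) (chunk_size : Int), Dom_create_upload_chunks file_size chunk_size → Pre_create_upload_chunks file_size chunk_size → Spec_create_upload_chunks file_size chunk_size (create_upload_chunks file_size chunk_size)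
def Claim_changed_create_upload_chunks : Prop := Dom_create_upload_chunks (pvDiffWitness_create_upload_chunks.1) (pvDiffWitness_create_upload_chunks.2) ∧ Pre_create_upload_chunks (pvDiffWitness_create_upload_chunks.1) (pvDiffWitness_create_upload_chunks.2) ∧ D_create_upload_chunks (pvDiffWitness_create_upload_chunks.1) (pvDiffWitness_create_upload_chunks.2) ∧ create_upload_chunks (pvDiffWitness_create_upload_chunks.1) (pvDiffWitness_create_upload_chunks.2) = pvDiffWitnessOut_create_upload_chunks.1 ∧ create_upload_chunks_alt (pvDiffWitness_create_upload_chunks.1) (pvDiffWitness_create_upload_chunks.2) = pvDiffWitnessOut_create_upload_chunks.2 ∧ pvDiffWitnessOut_create_upload_chunks.1 ≠ pvDiffWitnessOut_create_upload_chunks.2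
def Claim_exact_create_upload_chunks : Prop := ∀ (file_size : Int) (chunk_size : Int), Dom_create_upload_chunks file_size chunk_size → Pre_create_upload_chunks file_size chunk_size → D_create_upload_chunks file_size chunk_size → create_upload_chunks file_size chunk_size ≠ create_upload_chunks_alt file_size chunk_size

-- ===== LEMMAS AND PROOFS =====

-- intermediate form both sides are compared to: the chunk list as a forward map
def pvHelperMap (file_size : Int) (chunk_size : Int) : List String :=
  (PySem.List.pyRange 0 file_size chunk_size).map
    (fun start => "bytes=" ++ PySem.Int.toStr start ++ "-" ++
                  PySem.Int.toStr (min (start + chunk_size) file_size - 1))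

theorem pvHelperMap_nil (e cs : Int) (he : e ≤ 0) (hcs : 0 < cs) :
    pvHelperMap e cs = [] := by
  unfold pvHelperMap
  rw [PySem.List.pyRange_of_pos 0 e hcs, if_neg (by omega)]
  rfl

-- peeling the last chunk off the forward map
theorem pvHelperMap_step (e cs : Int) (he : 0 < e) (hcs : 0 < cs) :
    pvHelperMap e cs =
      pvHelperMap ((e - 1) / cs * cs) cs ++
        ["bytes=" ++ PySem.Int.toStr ((e - 1) / cs * cs) ++ "-" ++
         PySem.Int.toStr (e - 1)] := by
  set m := (e - 1) / cs with hm
  have hr0 : 0 ≤ (e - 1) % cs := Int.emod_nonneg _ (ne_of_gt hcs)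
  have hrlt : (e - 1) % cs < cs := Int.emod_lt_of_pos _ hcs
  have hsplit : e - 1 = cs * m + (e - 1) % cs := (Int.ediv_add_emod (e - 1) cs).symm
  have hm0 : 0 ≤ m := Int.ediv_nonneg (by omega) (le_of_lt hcs)
  have hmnat : ((m.toNat : Int)) = m := Int.toNat_of_nonneg hm0
  have hexp : cs * (m + 1) = cs * m + cs := by ring
  have hN : (if (0:Int) < e then ((e - 0 + cs - 1) / cs).toNat else 0) = m.toNat + 1 := by
    rw [if_pos he]
    have : e - 0 + cs - 1 = cs * (m + 1) + (e - 1) % cs := by omega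
    rw [this, Int.mul_add_ediv_left _ _ (ne_of_gt hcs),
        Int.ediv_eq_zero_of_lt hr0 hrlt]
    omega
  have hNs : (if (0:Int) < m * cs then ((m * cs - 0 + cs - 1) / cs).toNat else 0) = m.toNat := by
    by_cases hpos : (0:Int) < m * cs
    · rw [if_pos hpos]
      have : m * cs - 0 + cs - 1 = cs * m + (cs - 1) := by ring
      rw [this, Int.mul_add_ediv_left _ _ (ne_of_gt hcs),
          Int.ediv_eq_zero_of_lt (by omega) (by omega)]
      omega
    · rw [if_neg hpos]
      have h1 : m * cs ≤ 0 := by omega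
      have hmz : m = 0 := by nlinarith
      simp [hmz]
  unfold pvHelperMap
  rw [PySem.List.pyRange_of_pos 0 e hcs, PySem.List.pyRange_of_pos 0 (m * cs) hcs, hN, hNs]
  simp only [List.map_map]
  rw [List.range_succ, List.map_append]
  congr 1
  · -- the first m chunks agree (their ends are below both e and m*cs)
    apply List.map_congr_left
    intro k hk
    have hk' : (k : Int) < m := by
      have := List.mem_range.mp hk
      omega
    have hub : cs * ((k : Int) + 1) ≤ cs * m := by
      apply mul_le_mul_of_nonneg_left (by omega) (le_of_lt hcs)
    have h1 : min (0 + cs * (k : Int) + cs) (m * cs) = 0 + cs * (k : Int) + cs := by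
      rw [min_eq_left]; nlinarith
    have h2 : min (0 + cs * (k : Int) + cs) e = 0 + cs * (k : Int) + cs := by
      rw [min_eq_left]; nlinarith
    simp only [Function.comp_apply, h1, h2]
  · -- the peeled last chunk
    have hoff : 0 + cs * m = m * cs := by ring
    have hmin : min (m * cs + cs) e = e := by
      rw [min_eq_right]; nlinarith
    simp only [List.map_cons, List.map_nil, Function.comp_apply, hmnat, hoff, hmin]

-- the back-to-front loop computes the reversed forward map
theorem pvAltGo_eq (cs : Int) (hcs : 0 < cs) :
    ∀ (fuel : Nat) (e : Int), e.toNat < fuel → ∀ acc : List String,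
      pvAltGo cs e acc fuel = acc ++ (pvHelperMap e cs).reverse := by
  intro fuel
  induction fuel with
  | zero => intro e h; omega
  | succ n ih =>
    intro e hlt acc
    rw [pvAltGo]
    by_cases he : e ≤ 0
    · rw [if_pos he, pvHelperMap_nil e cs he hcs]; simp
    · rw [if_neg he]
      have hfd : PySem.Int.floordiv (e - 1) cs = (e - 1) / cs :=
        PySem.Int.floordiv_eq_ediv_of_pos hcs
      have hle : (e - 1) / cs * cs ≤ e - 1 := Int.ediv_mul_le _ (ne_of_gt hcs)
      simp only [hfd]
      rw [ih _ (by omega)]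
      rw [pvHelperMap_step e cs (by omega) hcs]
      simp

theorem create_upload_chunks_alt_eq (file_size chunk_size : Int) (hcs : 0 < chunk_size) :
    create_upload_chunks_alt file_size chunk_size = pvHelperMap file_size chunk_size := by
  unfold create_upload_chunks_alt
  rw [if_neg (by omega), pvAltGo_eq chunk_size hcs (file_size.toNat + 1) file_size (by omega) []]
  simp

-- append-accumulator foldl is a map
theorem pv_foldl_append {α β : Type} (g : α → β) :
    ∀ (l : List α) (init : List β),
      l.foldl (fun acc i => acc ++ [g i]) init = init ++ l.map g := by
  intro l
  induction l with
  | nil => intro init; simp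
  | cons x xs ih => intro init; simp [List.foldl, ih]

-- A returns [] whenever quotient and remainder are nonpositive
theorem pv_A_nil (fs cs : Int) (hq : Int.tdiv fs cs ≤ 0)
    (hr : PySem.Int.mod fs cs ≤ 0) :
    create_upload_chunks fs cs = [] := by
  unfold create_upload_chunks
  simp only [PySem.List.pyRange_one_eq_nil hq, List.foldl_nil]
  rw [if_neg (by omega)]

-- fmod's value is nonpositive when the divisor is negative and the dividend is not
theorem pv_fmod_nonpos_of_neg (fs cs : Int) (hcs : cs < 0) :
    PySem.Int.mod fs cs ≤ 0 := by
  unfold PySem.Int.mod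
  rw [Int.fmod_eq_emod]
  by_cases hd : cs ∣ fs
  · rw [if_pos (Or.inr hd), Int.emod_eq_zero_of_dvd hd]; omega
  · rw [if_neg (by push_neg; exact ⟨by omega, hd⟩)]
    have h1 : fs % cs < |cs| := Int.emod_lt_abs fs (by omega)
    have h2 : |cs| = -cs := abs_of_neg hcs
    omega

-- negative chunk_size, negative file_size above it: both sides are []
theorem create_upload_chunks_eq_small_neg (file_size chunk_size : Int)
    (hfs : file_size < 0) (hcs : chunk_size < 0) (h : chunk_size < file_size) :
    create_upload_chunks file_size chunk_size =
      create_upload_chunks_alt file_size chunk_size := by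
  have h0 : Int.tdiv file_size chunk_size = Int.tdiv (-file_size) (-chunk_size) := by
    rw [Int.neg_tdiv, Int.tdiv_neg, neg_neg]
  have hq : Int.tdiv file_size chunk_size ≤ 0 := by
    rw [h0, Int.tdiv_eq_zero_of_lt (by omega) (by omega)]
  rw [pv_A_nil _ _ hq (pv_fmod_nonpos_of_neg _ _ hcs)]
  unfold create_upload_chunks_alt
  rw [if_pos (by omega)]

-- negative chunk_size with nonnegative file_size: both sides are []
theorem create_upload_chunks_eq_neg_step (file_size chunk_size : Int)
    (hfs : 0 ≤ file_size) (hcs : chunk_size < 0) :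
    create_upload_chunks file_size chunk_size =
      create_upload_chunks_alt file_size chunk_size := by
  have hq : Int.tdiv file_size chunk_size ≤ 0 := by
    have h := Int.tdiv_nonneg hfs (by omega : (0:Int) ≤ -chunk_size)
    rw [Int.tdiv_neg] at h; omega
  rw [pv_A_nil _ _ hq (pv_fmod_nonpos_of_neg _ _ hcs)]
  unfold create_upload_chunks_alt
  rw [if_pos (by omega)]

-- main case: 0 ≤ file_size, 0 < chunk_size — A equals the forward map
theorem create_upload_chunks_eq (file_size chunk_size : Int)
    (hfs : 0 ≤ file_size) (hcs : 0 < chunk_size) :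
    create_upload_chunks file_size chunk_size =
      pvHelperMap file_size chunk_size := by
  unfold create_upload_chunks pvHelperMap
  have hq : Int.tdiv file_size chunk_size = file_size / chunk_size :=
    Int.tdiv_eq_ediv_of_nonneg hfs
  have hr : PySem.Int.mod file_size chunk_size = file_size % chunk_size :=
    PySem.Int.mod_eq_emod_of_pos hcs
  set q := file_size / chunk_size with hqdef
  set r := file_size % chunk_size with hrdef
  have hsplit : file_size = chunk_size * q + r := (Int.ediv_add_emod file_size chunk_size).symm
  have hr0 : 0 ≤ r := Int.emod_nonneg file_size (ne_of_gt hcs)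
  have hrlt : r < chunk_size := Int.emod_lt_of_pos file_size hcs
  have hq0 : 0 ≤ q := Int.ediv_nonneg hfs (le_of_lt hcs)
  have hqnat : ((q.toNat : Int)) = q := Int.toNat_of_nonneg hq0
  simp only [hq, hr, pv_foldl_append, PySem.List.pyRange_one,
      PySem.List.pyRange_of_pos 0 file_size hcs,
      List.nil_append, List.map_map, sub_zero, zero_add]
  by_cases hrpos : r > 0
  · -- remainder chunk present
    have hNeq : (if (0:Int) < file_size then
        ((file_size + chunk_size - 1) / chunk_size).toNat else 0) = q.toNat + 1 := by
      have hfspos : (0:Int) < file_size := by nlinarith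
      rw [if_pos hfspos]
      have : file_size + chunk_size - 1 = chunk_size * (q + 1) + (r - 1) := by linarith
      rw [this, Int.mul_add_ediv_left _ _ (ne_of_gt hcs),
          Int.ediv_eq_zero_of_lt (by linarith) (by linarith)]
      omega
    rw [if_pos hrpos, hNeq, List.range_succ, List.map_append]
    congr 1
    · -- the q full chunks agree
      apply List.map_congr_left
      intro k hk
      have hk' : (k : Int) < q := by
        have := List.mem_range.mp hk
        omega
      have hmin : min (chunk_size * (k : Int) + chunk_size) file_size
          = chunk_size * (k : Int) + chunk_size := by
        have : chunk_size * ((k : Int) + 1) ≤ chunk_size * q := by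
          apply mul_le_mul_of_nonneg_left (by omega) (le_of_lt hcs)
        rw [min_eq_left]; nlinarith
      simp only [Function.comp_apply, hmin]
      congr 1 <;> [skip; congr 1] <;> ring_nf
    · -- the remainder chunk agrees
      have hmin : min (chunk_size * q + chunk_size) file_size = file_size := by
        rw [min_eq_right]; nlinarith
      simp only [List.map_cons, List.map_nil, Function.comp_apply, hqnat, hmin]
      congr 2
      ring
  · -- no remainder: file_size = chunk_size * q exactly
    have hreq : r = 0 := le_antisymm (by omega) hr0
    have hNeq : (if (0:Int) < file_size then
        ((file_size + chunk_size - 1) / chunk_size).toNat else 0) = q.toNat := by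
      by_cases hfspos : (0:Int) < file_size
      · rw [if_pos hfspos]
        have : file_size + chunk_size - 1 = chunk_size * q + (chunk_size - 1) := by linarith
        rw [this, Int.mul_add_ediv_left _ _ (ne_of_gt hcs),
            Int.ediv_eq_zero_of_lt (by linarith) (by linarith)]
        omega
      · rw [if_neg hfspos]
        have : file_size = 0 := by omega
        have : q = 0 := by
          rw [hqdef, this]; exact Int.zero_ediv chunk_size
        omega
    rw [if_neg hrpos, hNeq]
    apply List.map_congr_left
    intro k hk
    have hk' : (k : Int) < q := by
      have := List.mem_range.mp hk
      omega
    have hmin : min (chunk_size * (k : Int) + chunk_size) file_size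
        = chunk_size * (k : Int) + chunk_size := by
      have : chunk_size * ((k : Int) + 1) ≤ chunk_size * q := by
        apply mul_le_mul_of_nonneg_left (by omega) (le_of_lt hcs)
      rw [min_eq_left]; nlinarith
    simp only [Function.comp_apply, hmin]
    congr 1 <;> [skip; congr 1] <;> ring_nf

-- negative file_size divisible by chunk_size: both sides are []
theorem create_upload_chunks_eq_neg_size (file_size chunk_size : Int)
    (hfs : file_size < 0) (hcs : 0 < chunk_size)
    (hd : chunk_size ∣ file_size) :
    create_upload_chunks file_size chunk_size =
      create_upload_chunks_alt file_size chunk_size := by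
  have hq : Int.tdiv file_size chunk_size ≤ 0 := by
    have h := Int.tdiv_nonneg (by omega : (0:Int) ≤ -file_size) (le_of_lt hcs)
    rw [Int.neg_tdiv] at h; omega
  have hr : PySem.Int.mod file_size chunk_size ≤ 0 := by
    rw [PySem.Int.mod_eq_emod_of_pos hcs, Int.emod_eq_zero_of_dvd hd]
  rw [pv_A_nil _ _ hq hr, create_upload_chunks_alt_eq _ _ hcs,
      pvHelperMap_nil _ _ (by omega) hcs]

-- inside D_: A appends the remainder chunk to an empty prefix, B is []
theorem pv_inside_D (file_size chunk_size : Int)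
    (hfs : file_size < 0) (hcs : 0 < chunk_size)
    (hd : ¬ chunk_size ∣ file_size) :
    create_upload_chunks file_size chunk_size ≠ [] ∧
      create_upload_chunks_alt file_size chunk_size = [] := by
  constructor
  · have hq : Int.tdiv file_size chunk_size ≤ 0 := by
      have h := Int.tdiv_nonneg (by omega : (0:Int) ≤ -file_size) (le_of_lt hcs)
      rw [Int.neg_tdiv] at h; omega
    have hr : PySem.Int.mod file_size chunk_size > 0 := by
      rw [PySem.Int.mod_eq_emod_of_pos hcs]
      have h1 : 0 ≤ file_size % chunk_size := Int.emod_nonneg file_size (ne_of_gt hcs)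
      have h2 : file_size % chunk_size ≠ 0 := fun h => hd (Int.dvd_of_emod_eq_zero h)
      omega
    unfold create_upload_chunks
    simp only [PySem.List.pyRange_one_eq_nil hq, List.foldl_nil]
    rw [if_pos hr]
    simp
  · rw [create_upload_chunks_alt_eq _ _ hcs, pvHelperMap_nil _ _ (by omega) hcs]

-- ===== VERDICT (by name: the statement is the Claim_ definition above) =====
theorem create_upload_chunks_spec : Claim_unchanged_create_upload_chunks := by
  intro fs cs _ hpre hnd
  unfold Pre_create_upload_chunks at hpre
  unfold D_create_upload_chunks at hnd
  push_neg at hnd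
  rcases lt_trichotomy cs 0 with hcs | hcs | hcs
  · rcases le_or_gt 0 fs with hfs | hfs
    · exact create_upload_chunks_eq_neg_step fs cs hfs hcs
    · exact create_upload_chunks_eq_small_neg fs cs hfs hcs
        (by rcases hpre.2 with h | h | h <;> omega)
  · exact absurd hcs hpre.1
  · rcases le_or_gt 0 fs with hfs | hfs
    · rw [create_upload_chunks_eq fs cs hfs hcs, create_upload_chunks_alt_eq fs cs hcs]
    · exact create_upload_chunks_eq_neg_size fs cs hfs hcs (hnd hfs hcs)

theorem create_upload_chunks_changed : Claim_changed_create_upload_chunks := by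
  unfold Claim_changed_create_upload_chunks; decide

theorem create_upload_chunks_tight : Claim_exact_create_upload_chunks := by
  intro fs cs _ _ hD
  obtain ⟨hA, hB⟩ := pv_inside_D fs cs hD.1 hD.2.1 hD.2.2
  intro h
  exact hA (h.trans hB)
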